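-- pv_equiv track=rewrite | github.com/lihuining/SSP_EM | bytetrack_resize_crowdhuman_test.py | interpolate_to_obtain_traj
-- ===== SOURCE A (Python) =====
-- def interpolate_to_obtain_traj(input_list):
--     output_list = []
--     for input_list_idx in range(len(input_list)):
--         if input_list_idx < len(input_list) - 1:
--             output_list.append(input_list[input_list_idx])
--             output_list.append([input_list[input_list_idx][1], input_list[input_list_idx + 1][0]])
--         elif input_list_idx == len(input_list) - 1:
--             output_list.append(input_list[input_list_idx])
--     return output_list
-- ===== SOURCE B (Python) =====
-- def interpolate_to_obtain_traj(input_list):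
--     # Recursive decomposition: a trajectory of <2 segments is its own
--     # interpolation; otherwise emit the first segment and its bridge, then
--     # recurse on the rest.
--     if len(input_list) < 2:
--         return input_list[:]
--     first, second = input_list[0], input_list[1]
--     return [first, [first[1], second[0]]] + interpolate_to_obtain_traj(input_list[1:])
-- ===== Notes on version B (the rewrite author's own statement) =====
-- stated objective: simpler
-- what changed: Replaces A's index-based accumulator loop with its idx<len-1 / idx==len-1 branching by a short structural recursion: base case for lists of fewer than two segments, otherwise emit the head and its bridge and recurse on the tail.
import Mathlib
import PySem

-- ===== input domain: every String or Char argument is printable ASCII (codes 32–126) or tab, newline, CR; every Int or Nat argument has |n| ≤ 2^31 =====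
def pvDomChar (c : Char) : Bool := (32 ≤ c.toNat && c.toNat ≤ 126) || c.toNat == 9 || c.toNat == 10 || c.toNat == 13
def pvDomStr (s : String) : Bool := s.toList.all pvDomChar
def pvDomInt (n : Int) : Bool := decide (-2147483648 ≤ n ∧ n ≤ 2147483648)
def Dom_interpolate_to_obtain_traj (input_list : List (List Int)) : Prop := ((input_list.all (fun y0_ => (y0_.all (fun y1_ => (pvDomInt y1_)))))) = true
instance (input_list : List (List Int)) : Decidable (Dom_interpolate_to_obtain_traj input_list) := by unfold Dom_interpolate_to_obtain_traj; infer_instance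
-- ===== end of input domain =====

-- B replaces A's index-based accumulator loop (range(len) with idx<len-1 / idx==len-1
-- branches) by a short structural recursion on the list (objective: simpler).

-- ===== PORT A =====
-- A indexes input_list[idx][1] and input_list[idx+1][0]; those accesses are in range
-- exactly on Pre_ below, so the port uses the total pyGetD form.
def interpolate_to_obtain_traj (input_list : List (List Int)) : List (List Int) :=
  (PySem.List.pyRange 0 input_list.length 1).foldl
    (fun output_list idx =>
      if idx < (input_list.length : Int) - 1 then
        (output_list ++ [PySem.List.pyGetD input_list idx []])
          ++ [[PySem.List.pyGetD (PySem.List.pyGetD input_list idx []) 1 0,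
               PySem.List.pyGetD (PySem.List.pyGetD input_list (idx + 1) []) 0 0]]
      else if idx = (input_list.length : Int) - 1 then
        output_list ++ [PySem.List.pyGetD input_list idx []]
      else output_list) []

-- ===== PORT B =====
-- Source B recurses: lists of fewer than two segments are returned as-is; otherwise the
-- head, its bridge [first[1], second[0]], then the recursion on the tail.
def interpolate_to_obtain_traj_alt : List (List Int) → List (List Int)
  | [] => []
  | [x] => [x]
  | x :: y :: r =>
      x :: [PySem.List.pyGetD x 1 0, PySem.List.pyGetD y 0 0]
        :: interpolate_to_obtain_traj_alt (y :: r)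

-- ===== PRECONDITION & SPEC =====
-- Pre_: exactly where Python A returns (IndexError otherwise): every element except the
-- last needs a second entry, every element except the first needs a first entry.
def Pre_interpolate_to_obtain_traj (input_list : List (List Int)) : Prop :=
  (∀ x ∈ input_list.dropLast, 2 ≤ x.length) ∧ (∀ x ∈ input_list.tail, x ≠ [])
instance (input_list : List (List Int)) : Decidable (Pre_interpolate_to_obtain_traj input_list) := by
  unfold Pre_interpolate_to_obtain_traj; infer_instance
def pvWitness_interpolate_to_obtain_traj : List (List Int) := [[1, 2], [3, 4], [5, 6]]

def Spec_interpolate_to_obtain_traj (input_list : List (List Int)) (out : List (List Int)) : Prop := out = interpolate_to_obtain_traj_alt input_list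
instance (input_list : List (List Int)) (out : List (List Int)) : Decidable (Spec_interpolate_to_obtain_traj input_list out) := by unfold Spec_interpolate_to_obtain_traj; infer_instance

-- ===== CLAIM (what is proved, stated in full; the proofs are below) =====
def Claim_equal_interpolate_to_obtain_traj : Prop := ∀ (input_list : List (List Int)), Dom_interpolate_to_obtain_traj input_list → Pre_interpolate_to_obtain_traj input_list → Spec_interpolate_to_obtain_traj input_list (interpolate_to_obtain_traj input_list)

-- ===== LEMMAS AND PROOFS =====

-- the per-index contribution of A's loop body
def pvStep (l : List (List Int)) (i : Int) : List (List Int) :=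
  if i < (l.length : Int) - 1 then
    [PySem.List.pyGetD l i []]
      ++ [[PySem.List.pyGetD (PySem.List.pyGetD l i []) 1 0,
           PySem.List.pyGetD (PySem.List.pyGetD l (i + 1) []) 0 0]]
  else if i = (l.length : Int) - 1 then [PySem.List.pyGetD l i []]
  else []

lemma pvRange_natCast (m : Nat) :
    PySem.List.pyRange 0 (m : Int) 1 = (List.range m).map (fun k : Nat => (k : Int)) := by
  rw [PySem.List.pyRange_one]; simp

lemma pvStep_shift (x : List Int) (l : List (List Int)) (k : Nat) :
    pvStep (x :: l) (((k + 1 : Nat)) : Int) = pvStep l ((k : Nat) : Int) := by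
  unfold pvStep
  have e1 : (((k + 1 : Nat) : Int)) + 1 = ((k + 2 : Nat) : Int) := by push_cast; ring
  have e2 : ((k : Nat) : Int) + 1 = ((k + 1 : Nat) : Int) := by push_cast; ring
  rw [e1, e2]
  simp only [PySem.List.pyGetD_natCast, List.length_cons, List.getD_cons_succ]
  split_ifs with p q r s <;> first
    | rfl
    | (exfalso; push_cast at *; omega)

lemma pvA_flatMap (l : List (List Int)) :
    (PySem.List.pyRange 0 l.length 1).flatMap (pvStep l) = interpolate_to_obtain_traj_alt l := by
  induction l with
  | nil => simp [PySem.List.pyRange_one_eq_nil, interpolate_to_obtain_traj_alt]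
  | cons x l ih =>
    rw [List.length_cons]
    rw [pvRange_natCast (l.length + 1), List.flatMap_map, List.range_succ_eq_map,
        List.flatMap_cons, List.flatMap_map]
    have hfun : ∀ k ∈ List.range l.length,
        (fun k : Nat => pvStep (x :: l) ((k.succ : Nat) : Int)) k
          = (fun k : Nat => pvStep l ((k : Nat) : Int)) k := by
      intro k _
      exact pvStep_shift x l k
    rw [List.flatMap_congr hfun, ← List.flatMap_map (fun k : Nat => ((k : Nat) : Int)) (pvStep l),
        ← pvRange_natCast, ih]
    cases l with
    | nil => simp [pvStep, interpolate_to_obtain_traj_alt]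
    | cons y r =>
      simp only [pvStep, interpolate_to_obtain_traj_alt, List.length_cons]
      have hpos : (((0 : Nat)) : Int) < (((r.length + 1 + 1 : Nat)) : Int) - 1 := by push_cast; omega
      rw [if_pos hpos]
      have e : (((0 : Nat)) : Int) + 1 = ((1 : Nat) : Int) := by norm_num
      rw [e]
      simp [PySem.List.pyGetD]

lemma pvA_eq_alt (l : List (List Int)) :
    interpolate_to_obtain_traj l = interpolate_to_obtain_traj_alt l := by
  unfold interpolate_to_obtain_traj
  have hbody : ∀ (acc : List (List Int)), ∀ i ∈ PySem.List.pyRange 0 l.length 1,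
      (fun output_list idx =>
        if idx < (l.length : Int) - 1 then
          (output_list ++ [PySem.List.pyGetD l idx []])
            ++ [[PySem.List.pyGetD (PySem.List.pyGetD l idx []) 1 0,
                 PySem.List.pyGetD (PySem.List.pyGetD l (idx + 1) []) 0 0]]
        else if idx = (l.length : Int) - 1 then
          output_list ++ [PySem.List.pyGetD l idx []]
        else output_list) acc i
      = (fun acc i => acc ++ pvStep l i) acc i := by
    intro acc i _
    dsimp only
    unfold pvStep
    split_ifs <;> simp
  rw [PySem.List.foldl_congr_mem _ _ _ _ hbody,
      PySem.List.foldl_append_eq_flatMap, pvA_flatMap]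
  simp

-- ===== VERDICT (by name: the statement is the Claim_ definition above) =====
theorem interpolate_to_obtain_traj_spec : Claim_equal_interpolate_to_obtain_traj := by
  intro l _ _
  unfold Spec_interpolate_to_obtain_traj
  rw [pvA_eq_alt]
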